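-- pv_equiv track=rewrite | github.com/explosion/spacy-transformers | spacy_transformers/_tokenizers.py | fix_alignment
-- ===== SOURCE A (Python) =====
-- def fix_alignment(segments):
--     """Turn a nested segment alignment into an alignment for the whole input,
--     by offsetting and accounting for special tokens."""
--     offset = 0
--     output = []
--     for segment in segments:
--         seen = set()
--         for idx_group in segment:
--             output.append([idx + offset for idx in idx_group])
--             seen.update({idx for idx in idx_group})
--         offset += len(seen)
--         if segment:
--             offset += 1
--     return output
-- ===== SOURCE B (Python) =====
-- def fix_alignment(segments):
--     # Build the result back-to-front: walk segments in reverse, prepending the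
--     # current segment's groups unshifted and shifting everything built so far
--     # by this segment's offset contribution. No running offset is maintained.
--     output = []
--     for segment in reversed(segments):
--         bump = len({idx for group in segment for idx in group})
--         if segment:
--             bump += 1
--         output = [list(group) for group in segment] + \
--                  [[idx + bump for idx in row] for row in output]
--     return output
-- ===== Notes on version B (the rewrite author's own statement) =====
-- stated objective: alternative
-- what changed: Builds the output back-to-front with no running offset: segments are traversed in reverse, each step prepending the current segment's groups unshifted and re-shifting the whole partial result by that segment's distinct-count contribution, so offsets emerge from repeated suffix shifts instead of accumulation.
import Mathlib
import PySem

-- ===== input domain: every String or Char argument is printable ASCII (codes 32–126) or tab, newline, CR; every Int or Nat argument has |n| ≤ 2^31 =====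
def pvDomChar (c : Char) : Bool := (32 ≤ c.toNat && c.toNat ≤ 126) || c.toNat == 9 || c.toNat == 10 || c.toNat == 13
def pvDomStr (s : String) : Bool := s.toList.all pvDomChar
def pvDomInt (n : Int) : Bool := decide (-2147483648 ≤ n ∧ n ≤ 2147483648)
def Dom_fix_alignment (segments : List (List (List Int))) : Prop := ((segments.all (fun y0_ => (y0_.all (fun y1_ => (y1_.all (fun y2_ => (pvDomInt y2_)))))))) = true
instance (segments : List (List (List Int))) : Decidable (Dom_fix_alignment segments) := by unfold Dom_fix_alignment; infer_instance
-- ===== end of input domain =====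

-- B builds the output back-to-front by repeated shifting, with no running offset; same result, different traversal.

-- ===== PORT A =====
-- A: one forward loop; per segment an inner loop both appends the shifted groups
-- and accumulates the set of seen indices; offset advances by len(seen) (+1 if non-empty).
def fix_alignment (segments : List (List (List Int))) : List (List Int) :=
  (segments.foldl
    (fun (st : Int × List (List Int)) segment =>
      let inner := segment.foldl
        (fun (st2 : PySem.Set Int × List (List Int)) idx_group =>
          (PySem.Set.update st2.1 (PySem.Set.ofList idx_group),
           st2.2 ++ [idx_group.map (fun idx => idx + st.1)]))
        (PySem.Set.empty, st.2)
      (st.1 + PySem.Set.len inner.1 + (if segment ≠ [] then 1 else 0), inner.2))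
    (0, [])).2

-- ===== PORT B =====
-- B: walk segments in reverse; prepend the current segment's groups unshifted and
-- shift the whole partial result by this segment's contribution (bump).
def fix_alignment_alt (segments : List (List (List Int))) : List (List Int) :=
  segments.reverse.foldl
    (fun output segment =>
      let bump : Int :=
        PySem.Set.len (PySem.Set.ofList (segment.flatMap (fun group => group)))
          + (if segment ≠ [] then 1 else 0)
      segment.map (fun group => group)  -- list(group) copies; identity on immutable lists
        ++ output.map (fun row => row.map (fun idx => idx + bump)))
    []

-- ===== PRECONDITION & SPEC =====
def Spec_fix_alignment (segments : List (List (List Int))) (out : List (List Int)) : Prop := out = fix_alignment_alt segments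
instance (segments : List (List (List Int))) (out : List (List Int)) : Decidable (Spec_fix_alignment segments out) := by unfold Spec_fix_alignment; infer_instance

-- ===== CLAIM (what is proved, stated in full; the proofs are below) =====
def Claim_equal_fix_alignment : Prop := ∀ (segments : List (List (List Int))), Dom_fix_alignment segments → Spec_fix_alignment segments (fix_alignment segments)

-- ===== LEMMAS AND PROOFS =====

-- per-segment offset increment
def segCnt (segment : List (List Int)) : Int :=
  PySem.Set.len (PySem.Set.ofList (segment.flatMap (fun g => g)))
    + (if segment ≠ [] then 1 else 0)

-- reference emission both ports are reduced to
def emit : List (List (List Int)) → Int → List (List Int)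
  | [], _ => []
  | seg :: rest, off => seg.map (fun g => g.map (fun i => i + off)) ++ emit rest (off + segCnt seg)

lemma update_ofList_right (s : PySem.Set Int) (g : List Int) :
    PySem.Set.update s (PySem.Set.ofList g) = PySem.Set.update s g := by
  rw [PySem.Set.update_eq_append_filter, PySem.Set.update_eq_append_filter,
    PySem.Set.ofList_ofList]

lemma innerA (segment : List (List Int)) (seen : PySem.Set Int)
    (out : List (List Int)) (off : Int) :
    segment.foldl
      (fun (st2 : PySem.Set Int × List (List Int)) idx_group =>
        (PySem.Set.update st2.1 (PySem.Set.ofList idx_group),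
         st2.2 ++ [idx_group.map (fun idx => idx + off)]))
      (seen, out)
    = (PySem.Set.update seen (segment.flatMap (fun g => g)),
       out ++ segment.map (fun g => g.map (fun i => i + off))) := by
  induction segment generalizing seen out with
  | nil => simp [PySem.Set.update]
  | cons g gs ih =>
    simp only [List.foldl_cons, ih, List.flatMap_cons, List.map_cons]
    rw [update_ofList_right, PySem.Set.update_append]
    simp

lemma outerA (segs : List (List (List Int))) (off : Int) (out : List (List Int)) :
    (segs.foldl
      (fun (st : Int × List (List Int)) segment =>
        let inner := segment.foldl
          (fun (st2 : PySem.Set Int × List (List Int)) idx_group =>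
            (PySem.Set.update st2.1 (PySem.Set.ofList idx_group),
             st2.2 ++ [idx_group.map (fun idx => idx + st.1)]))
          (PySem.Set.empty, st.2)
        (st.1 + PySem.Set.len inner.1 + (if segment ≠ [] then 1 else 0), inner.2))
      (off, out)).2 = out ++ emit segs off := by
  induction segs generalizing off out with
  | nil => simp [emit]
  | cons seg rest ih =>
    simp only [List.foldl_cons, innerA, PySem.Set.empty, PySem.Set.update_nil_left] at ih ⊢
    rw [ih]
    simp [emit, segCnt, PySem.Set.len, List.append_assoc, add_assoc]

-- shifting a whole emission is the same as emitting with a larger base offset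
lemma emit_shift (segs : List (List (List Int))) (off c : Int) :
    (emit segs off).map (fun row => row.map (fun i => i + c)) = emit segs (off + c) := by
  induction segs generalizing off with
  | nil => simp [emit]
  | cons seg rest ih =>
    simp only [emit, List.map_append, List.map_map, ih]
    have : off + c + segCnt seg = off + segCnt seg + c := by ring
    rw [this]
    congr 1
    simp only [Function.comp_def, List.map_map]
    congr 1
    funext g
    congr 1
    funext i
    ring

lemma altB (segs : List (List (List Int))) :
    segs.reverse.foldl
      (fun output segment =>
        let bump : Int :=
          PySem.Set.len (PySem.Set.ofList (segment.flatMap (fun group => group)))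
            + (if segment ≠ [] then 1 else 0)
        segment.map (fun group => group)
          ++ output.map (fun row => row.map (fun idx => idx + bump)))
      [] = emit segs 0 := by
  rw [List.foldl_reverse]
  induction segs with
  | nil => simp [emit]
  | cons seg rest ih =>
    simp only [List.foldr_cons, ih]
    simp only [emit, emit_shift, List.map_id']
    congr 1
    simp

-- ===== VERDICT (by name: the statement is the Claim_ definition above) =====
theorem fix_alignment_spec : Claim_equal_fix_alignment := by
  intro segments _
  show fix_alignment segments = fix_alignment_alt segments
  rw [fix_alignment, outerA, fix_alignment_alt, altB]
  simp
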